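-- pv_equiv track=rewrite | github.com/tuanngocfun/DNA_storage_locally_balance | M3_work/construction2_fsm.py | _calculate_boundary_rds
-- ===== SOURCE A (Python) =====
-- from typing import Tuple, List, Dict, Optional
--
-- def _calculate_boundary_rds(encoded_3k: str) -> List[int]:
--     """Calculate RDS values at block boundaries"""
--     rds = 0
--     rds_values = [0]
--     for i, bit in enumerate(encoded_3k):
--         rds += 1 if bit == '1' else -1
--         if (i + 1) % 3 == 0:
--             rds_values.append(rds)
--     return rds_values
-- ===== SOURCE B (Python) =====
-- def _calculate_boundary_rds(encoded_3k: str):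
--     """Calculate RDS values at block boundaries (chunked: consume three bits per step)."""
--     bits = list(encoded_3k)
--     rds_values = [0]
--     total = 0
--     while len(bits) >= 3:
--         b1, b2, b3 = bits[0], bits[1], bits[2]
--         total += (1 if b1 == '1' else -1) + (1 if b2 == '1' else -1) + (1 if b3 == '1' else -1)
--         rds_values.append(total)
--         bits = bits[3:]
--     return rds_values
-- ===== Notes on version B (the rewrite author's own statement) =====
-- stated objective: alternative
-- what changed: B consumes the string in 3-bit chunks, adding one block delta per step and dropping the incomplete tail, instead of A's per-character pass with an enumerate index and a (i+1)%3 boundary test.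
import Mathlib
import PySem

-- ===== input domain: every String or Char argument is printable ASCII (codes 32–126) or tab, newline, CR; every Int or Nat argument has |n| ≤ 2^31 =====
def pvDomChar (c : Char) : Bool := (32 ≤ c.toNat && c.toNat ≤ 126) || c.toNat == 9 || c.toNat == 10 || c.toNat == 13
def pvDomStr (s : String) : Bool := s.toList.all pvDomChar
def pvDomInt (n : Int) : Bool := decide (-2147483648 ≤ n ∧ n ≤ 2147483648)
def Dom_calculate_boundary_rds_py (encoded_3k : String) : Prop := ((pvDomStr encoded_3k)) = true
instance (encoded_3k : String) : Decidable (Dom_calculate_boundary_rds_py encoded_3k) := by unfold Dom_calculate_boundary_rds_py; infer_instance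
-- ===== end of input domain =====

-- B replaces A's per-character enumerate pass (with a (i+1)%3 boundary test) by a
-- chunked loop that consumes three bits per step; objective: alternative decomposition.

-- ===== PORT A =====
-- enumerate(encoded_3k) with index starting at 0
def pvEnumFrom (i : Nat) : List Char → List (Nat × Char)
  | [] => []
  | c :: cs => (i, c) :: pvEnumFrom (i + 1) cs

def calculate_boundary_rds_py (encoded_3k : String) : List Int :=
  let st := (pvEnumFrom 0 encoded_3k.toList).foldl
    (fun (st : Int × List Int) (p : Nat × Char) =>
      let rds := st.1 + (if p.2 == '1' then (1 : Int) else -1)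
      if (p.1 + 1) % 3 = 0 then (rds, st.2 ++ [rds]) else (rds, st.2))
    ((0 : Int), [(0 : Int)])
  st.2

-- ===== PORT B =====
-- the while-loop of Source B: take three bits, add their delta, append, drop them
def pvChunkLoop (total : Int) (out : List Int) : List Char → List Int
  | b1 :: b2 :: b3 :: rest =>
    let t := total + ((if b1 == '1' then (1 : Int) else -1)
                    + (if b2 == '1' then (1 : Int) else -1)
                    + (if b3 == '1' then (1 : Int) else -1))
    pvChunkLoop t (out ++ [t]) rest
  | _ => out

def calculate_boundary_rds_py_alt (encoded_3k : String) : List Int :=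
  pvChunkLoop 0 [(0 : Int)] encoded_3k.toList

-- ===== PRECONDITION & SPEC =====
def Spec_calculate_boundary_rds_py (encoded_3k : String) (out : List Int) : Prop := out = calculate_boundary_rds_py_alt encoded_3k
instance (encoded_3k : String) (out : List Int) : Decidable (Spec_calculate_boundary_rds_py encoded_3k out) := by unfold Spec_calculate_boundary_rds_py; infer_instance

-- ===== CLAIM (what is proved, stated in full; the proofs are below) =====
def Claim_equal_calculate_boundary_rds_py : Prop := ∀ (encoded_3k : String), Dom_calculate_boundary_rds_py encoded_3k → Spec_calculate_boundary_rds_py encoded_3k (calculate_boundary_rds_py encoded_3k)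

-- ===== LEMMAS AND PROOFS =====

-- A's loop body, named for the lemmas
def pvStepA (st : Int × List Int) (p : Nat × Char) : Int × List Int :=
  let rds := st.1 + (if p.2 == '1' then (1 : Int) else -1)
  if (p.1 + 1) % 3 = 0 then (rds, st.2 ++ [rds]) else (rds, st.2)

-- the key invariant: starting at an index divisible by 3, A's fold collects exactly
-- the chunk sums that B's loop appends (the leftover < 3 bits change only rds, not the list)
theorem pvKey (l : List Char) : ∀ (i : Nat), i % 3 = 0 → ∀ (rds : Int) (acc : List Int),
    ((pvEnumFrom i l).foldl pvStepA (rds, acc)).2 = pvChunkLoop rds acc l := by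
  match l with
  | [] => intro i hi rds acc; simp [pvEnumFrom, pvChunkLoop]
  | [a] =>
    intro i hi rds acc
    have h1 : (i + 1) % 3 ≠ 0 := by omega
    simp [pvEnumFrom, pvStepA, pvChunkLoop, h1]
  | [a, b] =>
    intro i hi rds acc
    have h1 : (i + 1) % 3 ≠ 0 := by omega
    have h2 : (i + 1 + 1) % 3 ≠ 0 := by omega
    simp [pvEnumFrom, pvStepA, pvChunkLoop, h1, h2]
  | a :: b :: c :: rest =>
    intro i hi rds acc
    have h1 : (i + 1) % 3 ≠ 0 := by omega
    have h2 : (i + 1 + 1) % 3 ≠ 0 := by omega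
    have h3 : (i + 1 + 1 + 1) % 3 = 0 := by omega
    have ht : rds + (if a == '1' then (1 : Int) else -1) + (if b == '1' then (1 : Int) else -1)
            + (if c == '1' then (1 : Int) else -1)
          = rds + ((if a == '1' then (1 : Int) else -1) + (if b == '1' then (1 : Int) else -1)
            + (if c == '1' then (1 : Int) else -1)) := by ring
    simp only [pvEnumFrom, List.foldl_cons, pvStepA, if_neg h1, if_neg h2, if_pos h3]
    rw [pvKey rest (i + 1 + 1 + 1) h3, ht]
    simp only [pvChunkLoop]

-- ===== VERDICT (by name: the statement is the Claim_ definition above) =====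
theorem calculate_boundary_rds_py_spec : Claim_equal_calculate_boundary_rds_py := by
  intro s _
  show calculate_boundary_rds_py s = calculate_boundary_rds_py_alt s
  exact pvKey s.toList 0 rfl 0 [0]
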